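-- pv_equiv track=rewrite | github.com/lanlan47879/adventofcode2020 | day08/day08_part02.py | get_acc
-- ===== SOURCE A (Python) =====
-- def get_acc(exec_instructions):
--     acc = 0
--     visited_instructions = []
--     for instruction in exec_instructions:
--         visited_instruction = instruction
--         if visited_instruction in visited_instructions:
--             break
--
--         if 'acc' in instruction[0]:
--             value = int(instruction[0].split(' ')[1])
--             acc += value
--
--         visited_instructions.append(visited_instruction)
--
--     return acc
-- ===== SOURCE B (Python) =====
-- def get_acc(exec_instructions):
--     # two passes: find the cut (first repeated instruction), then sum over the prefix
--     seen = []
--     cut = len(exec_instructions)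
--     for i, instr in enumerate(exec_instructions):
--         if instr in seen:
--             cut = i
--             break
--         seen.append(instr)
--     total = 0
--     for instr in exec_instructions[:cut]:
--         if 'acc' in instr[0]:
--             total += int(instr[0].split(' ')[1])
--     return total
-- ===== Notes on version B (the rewrite author's own statement) =====
-- stated objective: alternative
-- what changed: A's single fused loop (accumulate while recording visited instructions, break on a repeat) is split into two passes: one pass finds the cut index of the first repeated instruction, a second pass sums the acc values over the prefix before the cut.
import Mathlib
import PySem

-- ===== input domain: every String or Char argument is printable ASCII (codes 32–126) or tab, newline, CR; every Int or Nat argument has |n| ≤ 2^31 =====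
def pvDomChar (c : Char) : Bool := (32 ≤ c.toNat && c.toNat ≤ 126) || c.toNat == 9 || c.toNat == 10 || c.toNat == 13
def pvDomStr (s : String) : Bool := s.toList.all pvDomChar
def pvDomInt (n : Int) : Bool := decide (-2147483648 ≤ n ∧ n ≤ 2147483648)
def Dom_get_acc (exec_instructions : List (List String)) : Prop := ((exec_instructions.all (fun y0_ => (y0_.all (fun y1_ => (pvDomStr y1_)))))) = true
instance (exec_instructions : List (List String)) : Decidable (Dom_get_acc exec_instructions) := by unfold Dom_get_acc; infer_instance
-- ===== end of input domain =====

-- B is a two-pass decomposition of A's fused loop (find the cut, then sum over the prefix); objective: alternative, same cost.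

-- shared transliterations of Python expressions used identically by A and B:
-- instruction[0]  (Pre_ guarantees the instruction is nonempty where evaluated)
def pvHead (instr : List String) : String := PySem.List.pyGetD instr 0 ""
-- 'acc' in instruction[0]
def pvHasAcc (instr : List String) : Bool := PySem.Str.isIn "acc" (pvHead instr)
-- instruction[0].split(' ')
def pvParts (instr : List String) : List String := (PySem.Str.split? (pvHead instr) " ").getD []
-- int(instruction[0].split(' ')[1])  (Pre_ guarantees index 1 exists and the int parses where evaluated)
def pvVal (instr : List String) : Int := (PySem.Int.ofStr? (PySem.List.pyGetD (pvParts instr) 1 "")).getD 0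

-- ===== PORT A =====
def get_acc_go : List (List String) → Int → List (List String) → Int
  | [], acc, _ => acc
  | instr :: rest, acc, seen =>
    if instr ∈ seen then acc
    else get_acc_go rest (if pvHasAcc instr then acc + pvVal instr else acc) (seen ++ [instr])

def get_acc (exec_instructions : List (List String)) : Int :=
  get_acc_go exec_instructions 0 []

-- ===== PORT B =====
-- first pass: index of the first instruction already seen (length if none repeats)
def pvCut : List (List String) → List (List String) → Nat
  | [], _ => 0
  | instr :: rest, seen =>
    if instr ∈ seen then 0 else 1 + pvCut rest (seen ++ [instr])

def get_acc_alt (exec_instructions : List (List String)) : Int :=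
  -- second pass: sum over exec_instructions[:cut]
  (exec_instructions.take (pvCut exec_instructions [])).foldl
    (fun total instr => if pvHasAcc instr then total + pvVal instr else total) 0

-- ===== PRECONDITION & SPEC =====
-- checkable form of "this instruction can be processed without raising":
def pvOkB (instr : List String) : Bool :=
  !instr.isEmpty &&
  (!(pvHasAcc instr) || (decide (1 < (pvParts instr).length) && (PySem.Int.ofStr? (PySem.List.pyGetD (pvParts instr) 1 "")).isSome))
-- Pre_ excludes exactly the inputs where Python A raises: some instruction reached before the first
-- repeat (i.e. inside a duplicate-free prefix) is empty (IndexError on instruction[0]) or contains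
-- 'acc' but has no second space-separated field (IndexError) or one that int() rejects (ValueError).
def Pre_get_acc (exec_instructions : List (List String)) : Prop :=
  ∀ p ∈ exec_instructions.inits, p.Nodup → p.all pvOkB = true
instance (exec_instructions : List (List String)) : Decidable (Pre_get_acc exec_instructions) := by
  unfold Pre_get_acc; infer_instance

def pvWitness_get_acc : List (List String) := [["acc +3"], ["nop +0"], ["acc +3"], ["acc"]]

def Spec_get_acc (exec_instructions : List (List String)) (out : Int) : Prop := out = get_acc_alt exec_instructions
instance (exec_instructions : List (List String)) (out : Int) : Decidable (Spec_get_acc exec_instructions out) := by unfold Spec_get_acc; infer_instance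

-- ===== CLAIM (what is proved, stated in full; the proofs are below) =====
def Claim_equal_get_acc : Prop := ∀ (exec_instructions : List (List String)), Dom_get_acc exec_instructions → Pre_get_acc exec_instructions → Spec_get_acc exec_instructions (get_acc exec_instructions)

-- ===== LEMMAS AND PROOFS =====

-- A's fused loop equals B's cut-then-fold, for any starting accumulator and seen-list
lemma get_acc_go_eq (xs : List (List String)) :
    ∀ (seen : List (List String)) (acc : Int),
      get_acc_go xs acc seen =
        (xs.take (pvCut xs seen)).foldl
          (fun total instr => if pvHasAcc instr then total + pvVal instr else total) acc := by
  induction xs with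
  | nil => intro seen acc; simp [get_acc_go, pvCut]
  | cons instr rest ih =>
    intro seen acc
    by_cases h : instr ∈ seen
    · simp [get_acc_go, pvCut, h]
    · simp only [get_acc_go, pvCut, if_neg h]
      rw [Nat.add_comm, List.take_succ_cons, List.foldl_cons, ih]

-- ===== VERDICT (by name: the statement is the Claim_ definition above) =====
theorem get_acc_spec : Claim_equal_get_acc := by
  intro xs _ _
  unfold Spec_get_acc get_acc get_acc_alt
  exact get_acc_go_eq xs [] 0
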